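-- pv_equiv track=rewrite | github.com/v0van4eg/StashLinks | generators/megamarket_generator.py | generate_row_data
-- ===== SOURCE A (Python) =====
-- def generate_row_data(article, urls, template_name): # template_name теперь доступен, но не используется в этом генераторе
--     row_data = [article]  # Код товара СММ
--     # Добавляем ссылки на изображения
--     if urls:
--         row_data.append(urls[0])  # Основное фото
--         # Дополнительные фото (максимум 9)
--         for i in range(1, 10):
--             if i < len(urls):
--                 row_data.append(urls[i])
--             else:
--                 row_data.append("")
--     else:
--         # Если нет изображений, добавляем пустые ячейки
--         row_data.append("")  # Основное фото
--         for i in range(1, 10):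
--             row_data.append("")
--     return row_data
-- ===== SOURCE B (Python) =====
-- def generate_row_data(article, urls, template_name):
--     imgs = list(urls)[:10] if urls else []
--     return [article] + imgs + [""] * (10 - len(imgs))
-- ===== Notes on version B (the rewrite author's own statement) =====
-- stated objective: simpler
-- what changed: Replaces the two duplicated branch bodies with their explicit 1..10 loops and per-index i<len(urls) tests by a single slice-and-pad construction: take the first 10 urls and pad with a computed number of empty strings.
import Mathlib
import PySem

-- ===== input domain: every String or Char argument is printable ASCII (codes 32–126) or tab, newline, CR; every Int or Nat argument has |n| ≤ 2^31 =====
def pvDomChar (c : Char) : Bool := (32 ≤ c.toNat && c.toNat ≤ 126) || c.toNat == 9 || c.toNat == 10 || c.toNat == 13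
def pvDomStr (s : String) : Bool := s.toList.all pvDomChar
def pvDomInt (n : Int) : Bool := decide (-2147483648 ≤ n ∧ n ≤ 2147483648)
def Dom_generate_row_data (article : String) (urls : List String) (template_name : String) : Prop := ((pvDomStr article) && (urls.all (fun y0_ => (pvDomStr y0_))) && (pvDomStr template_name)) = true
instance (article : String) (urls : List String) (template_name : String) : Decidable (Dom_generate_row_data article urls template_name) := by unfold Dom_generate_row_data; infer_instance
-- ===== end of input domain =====

-- ===== PORT A =====
-- B collapses A's two branches into one slice-and-pad construction; return values proved equal on all inputs.
def generate_row_data (article : String) (urls : List String) (template_name : String) : List String :=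
  let row_data := [article]
  if urls ≠ [] then
    let row_data := row_data ++ [PySem.List.pyGetD urls 0 ""]
    (PySem.List.pyRange 1 10 1).foldl
      (fun r i =>
        if i < (urls.length : Int) then r ++ [PySem.List.pyGetD urls i ""]
        else r ++ [""]) row_data
  else
    let row_data := row_data ++ [""]
    (PySem.List.pyRange 1 10 1).foldl (fun r _ => r ++ [""]) row_data

-- ===== PORT B =====
def generate_row_data_alt (article : String) (urls : List String) (template_name : String) : List String :=
  let imgs := if urls ≠ [] then PySem.List.slice urls none (some 10) else []
  [article] ++ imgs ++ List.replicate (10 - imgs.length) ""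

-- ===== PRECONDITION & SPEC =====
def Spec_generate_row_data (article : String) (urls : List String) (template_name : String) (out : List String) : Prop := out = generate_row_data_alt article urls template_name
instance (article : String) (urls : List String) (template_name : String) (out : List String) : Decidable (Spec_generate_row_data article urls template_name out) := by unfold Spec_generate_row_data; infer_instance

-- ===== CLAIM (what is proved, stated in full; the proofs are below) =====
def Claim_equal_generate_row_data : Prop := ∀ (article : String) (urls : List String) (template_name : String), Dom_generate_row_data article urls template_name → Spec_generate_row_data article urls template_name (generate_row_data article urls template_name)

-- ===== LEMMAS AND PROOFS =====

-- ===== VERDICT (by name: the statement is the Claim_ definition above) =====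
theorem generate_row_data_spec : Claim_equal_generate_row_data := by
  intro article urls template_name _
  unfold Spec_generate_row_data generate_row_data generate_row_data_alt
  have hr : PySem.List.pyRange 1 10 1 = [1,2,3,4,5,6,7,8,9] := by decide
  rw [hr]
  rcases urls with _ | ⟨u0, _ | ⟨u1, _ | ⟨u2, _ | ⟨u3, _ | ⟨u4, _ | ⟨u5, _ | ⟨u6, _ | ⟨u7, _ | ⟨u8, _ | ⟨u9, rest⟩⟩⟩⟩⟩⟩⟩⟩⟩⟩
  case cons.cons.cons.cons.cons.cons.cons.cons.cons.cons =>
    have H : ∀ i : Int, i ≤ 9 →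
        i < ((u0 :: u1 :: u2 :: u3 :: u4 :: u5 :: u6 :: u7 :: u8 :: u9 :: rest).length : Int) := by
      intro i h; simp; omega
    simp only [List.foldl, ne_eq, reduceCtorEq, not_false_eq_true, if_true]
    rw [if_pos (H 1 (by norm_num)), if_pos (H 2 (by norm_num)), if_pos (H 3 (by norm_num)),
        if_pos (H 4 (by norm_num)), if_pos (H 5 (by norm_num)), if_pos (H 6 (by norm_num)),
        if_pos (H 7 (by norm_num)), if_pos (H 8 (by norm_num)), if_pos (H 9 (by norm_num))]
    simp [PySem.List.pyGetD, PySem.List.pyGet?, PySem.List.pyIdx?,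
          PySem.List.slice]
    repeat' apply And.intro
    all_goals rw [if_pos (by omega)]
    all_goals simp
  all_goals
    simp [List.foldl, PySem.List.pyGetD, PySem.List.pyGet?, PySem.List.pyIdx?,
          PySem.List.slice, List.replicate]
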